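-- pv_equiv track=rewrite | github.com/TrongQuyet/auto-tiktok | media/pixabay_client.py | _choose_video
-- ===== SOURCE A (Python) =====
-- def _choose_video(videos: list[dict], used_ids: set) -> dict | None:
--     """Choose a video not yet used, with duration >= 3s."""
--     for v in videos:
--         vid = v.get("id")
--         if vid in used_ids:
--             continue
--         if v.get("duration", 0) >= 3:
--             return v
--     for v in videos:
--         if v.get("id") not in used_ids:
--             return v
--     return None
-- ===== SOURCE B (Python) =====
-- def _choose_video(videos: list[dict], used_ids: set) -> dict | None:
--     """Choose a video not yet used, with duration >= 3s (single pass)."""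
--     fallback = None
--     for v in videos:
--         if v.get("id") in used_ids:
--             continue
--         if fallback is None:
--             fallback = v
--         if v.get("duration", 0) >= 3:
--             return v
--     return fallback
-- ===== Notes on version B (the rewrite author's own statement) =====
-- stated objective: simpler
-- what changed: Replaces A's two full scans (first for an unused video with duration>=3, then for any unused video) with a single pass that remembers the first unused video as a fallback and returns early on a long-enough one.
import Mathlib
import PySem

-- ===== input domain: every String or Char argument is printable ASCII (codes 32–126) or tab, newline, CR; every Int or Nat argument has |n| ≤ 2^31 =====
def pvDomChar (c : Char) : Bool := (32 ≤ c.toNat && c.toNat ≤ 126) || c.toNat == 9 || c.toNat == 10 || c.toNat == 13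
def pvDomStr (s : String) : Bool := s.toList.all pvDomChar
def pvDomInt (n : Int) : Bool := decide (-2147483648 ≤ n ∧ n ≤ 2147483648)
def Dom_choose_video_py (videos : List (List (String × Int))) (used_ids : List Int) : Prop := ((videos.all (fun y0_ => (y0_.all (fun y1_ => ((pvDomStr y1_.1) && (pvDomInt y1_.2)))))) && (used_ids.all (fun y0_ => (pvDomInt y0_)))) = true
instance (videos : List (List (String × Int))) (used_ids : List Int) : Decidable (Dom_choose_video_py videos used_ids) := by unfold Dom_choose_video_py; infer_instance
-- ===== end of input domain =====

-- B merges A's two scans into one pass with a fallback variable; equivalence of return values, no speed claim.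

-- shared helpers: dict lookup on an association list (first match, like Python dict.get)
def pvDGet? (v : List (String × Int)) (k : String) : Option Int :=
  (v.find? (fun p => p.1 == k)).map (·.2)

def pvDGetD (v : List (String × Int)) (k : String) (d : Int) : Int :=
  (pvDGet? v k).getD d

-- `v.get("id") in used_ids` (None is never in a set of ints drawn from used_ids : List Int)
def pvIdUsed (v : List (String × Int)) (used_ids : List Int) : Bool :=
  match pvDGet? v "id" with
  | some i => used_ids.contains i
  | none => false

-- ===== PORT A =====
-- first loop: first unused video with duration >= 3
def pvALoop1 (videos : List (List (String × Int))) (used_ids : List Int) : Option (List (String × Int)) :=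
  match videos with
  | [] => none
  | v :: rest =>
    if pvIdUsed v used_ids then pvALoop1 rest used_ids
    else if pvDGetD v "duration" 0 ≥ 3 then some v
    else pvALoop1 rest used_ids

-- second loop: first unused video
def pvALoop2 (videos : List (List (String × Int))) (used_ids : List Int) : Option (List (String × Int)) :=
  match videos with
  | [] => none
  | v :: rest =>
    if pvIdUsed v used_ids then pvALoop2 rest used_ids else some v

def choose_video_py (videos : List (List (String × Int))) (used_ids : List Int) : Option (List (String × Int)) :=
  match pvALoop1 videos used_ids with
  | some v => some v
  | none => pvALoop2 videos used_ids

-- ===== PORT B =====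
-- single pass carrying the fallback (first unused video seen so far)
def pvBLoop (videos : List (List (String × Int))) (used_ids : List Int)
    (fallback : Option (List (String × Int))) : Option (List (String × Int)) :=
  match videos with
  | [] => fallback
  | v :: rest =>
    if pvIdUsed v used_ids then pvBLoop rest used_ids fallback
    else
      let fb' := match fallback with | none => some v | some f => some f
      if pvDGetD v "duration" 0 ≥ 3 then some v
      else pvBLoop rest used_ids fb'

def choose_video_py_alt (videos : List (List (String × Int))) (used_ids : List Int) : Option (List (String × Int)) :=
  pvBLoop videos used_ids none

-- ===== PRECONDITION & SPEC =====
def Spec_choose_video_py (videos : List (List (String × Int))) (used_ids : List Int) (out : Option (List (String × Int))) : Prop := out = choose_video_py_alt videos used_ids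
instance (videos : List (List (String × Int))) (used_ids : List Int) (out : Option (List (String × Int))) : Decidable (Spec_choose_video_py videos used_ids out) := by unfold Spec_choose_video_py; infer_instance

-- ===== CLAIM (what is proved, stated in full; the proofs are below) =====
def Claim_equal_choose_video_py : Prop := ∀ (videos : List (List (String × Int))) (used_ids : List Int), Dom_choose_video_py videos used_ids → Spec_choose_video_py videos used_ids (choose_video_py videos used_ids)

-- ===== LEMMAS AND PROOFS =====
-- B's single pass equals: A's first scan, else the pending fallback, else A's second scan.
theorem pvBLoop_eq (videos : List (List (String × Int))) (used_ids : List Int)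
    (fb : Option (List (String × Int))) :
    pvBLoop videos used_ids fb =
      match pvALoop1 videos used_ids with
      | some v => some v
      | none => match fb with
                | some f => some f
                | none => pvALoop2 videos used_ids := by
  induction videos generalizing fb with
  | nil => cases fb <;> simp [pvBLoop, pvALoop1, pvALoop2]
  | cons v rest ih =>
    simp only [pvBLoop, pvALoop1, pvALoop2]
    by_cases hu : pvIdUsed v used_ids
    · simp [hu, ih]
    · by_cases hd : pvDGetD v "duration" 0 ≥ 3
      · simp [hu, hd]
      · cases fb <;> simp [hu, hd, ih]

-- ===== VERDICT (by name: the statement is the Claim_ definition above) =====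
theorem choose_video_py_spec : Claim_equal_choose_video_py := by
  intro videos used_ids _
  unfold Spec_choose_video_py choose_video_py choose_video_py_alt
  rw [pvBLoop_eq]
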